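-- pv_equiv track=rewrite | github.com/faco400/Lights-out-PDDL | pddlParser.py | generateLightOnOffBroken
-- ===== SOURCE A (Python) =====
-- def generateLightOnOffBroken(i_parameters):
--   on_predicate = ''
--   off_predicate = ''
--   broken_predicate = ''
--
--   count_lines = 0
--   for line in i_parameters:
--     count_column = 0
--     for character in line[:-1]:
--       if character == 'D' or character == 'd':
--         off_predicate += f'(light-off x{count_lines} y{count_column})\n'
--         if character == 'd':
--           broken_predicate += f'(broken x{count_lines} y{count_column})\n'
--
--       if character == 'L' or character == 'l':
--         on_predicate += f'(light-on x{count_lines} y{count_column})\n'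
--         if character == 'l':
--           broken_predicate += f'(broken x{count_lines} y{count_column})\n'
--
--       count_column += 1
--     count_lines += 1
--
--   return on_predicate, off_predicate, broken_predicate
-- ===== SOURCE B (Python) =====
-- def generateLightOnOffBroken(i_parameters):
--   cells = [(i, j, ch)
--            for i, line in enumerate(i_parameters)
--            for j, ch in enumerate(line[:-1])]
--   on_predicate = ''.join(f'(light-on x{i} y{j})\n' for i, j, ch in cells if ch in 'Ll')
--   off_predicate = ''.join(f'(light-off x{i} y{j})\n' for i, j, ch in cells if ch in 'Dd')
--   broken_predicate = ''.join(f'(broken x{i} y{j})\n' for i, j, ch in cells if ch in 'dl')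
--   return on_predicate, off_predicate, broken_predicate
-- ===== Notes on version B (the rewrite author's own statement) =====
-- stated objective: alternative
-- what changed: replaces the single interleaved loop with nested counters by flattening the grid into one indexed (row, col, char) cell list and then building each of the three predicate strings with its own independent filter-and-join pass
import Mathlib
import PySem

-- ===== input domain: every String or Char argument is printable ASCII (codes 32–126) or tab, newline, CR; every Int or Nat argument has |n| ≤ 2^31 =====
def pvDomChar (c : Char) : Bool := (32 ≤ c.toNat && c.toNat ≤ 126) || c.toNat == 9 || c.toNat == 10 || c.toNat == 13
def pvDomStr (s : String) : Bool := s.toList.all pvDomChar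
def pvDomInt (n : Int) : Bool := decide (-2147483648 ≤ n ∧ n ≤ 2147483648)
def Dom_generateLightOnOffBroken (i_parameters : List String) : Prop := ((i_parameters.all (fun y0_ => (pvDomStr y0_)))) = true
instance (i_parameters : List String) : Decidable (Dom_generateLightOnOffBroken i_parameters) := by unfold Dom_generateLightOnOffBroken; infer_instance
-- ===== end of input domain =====

-- B flattens the grid into an indexed cell list and builds each predicate string with an independent filter-and-join pass (alternative decomposition, same cost).


-- shared rendering of the f-string literal f'(<tag> x{i} y{j})\n' (identical text in A and B)
def pvFmt (tag : List Char) (i j : Int) : List Char :=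
  tag ++ PySem.Int.toChars i ++ (" y".toList) ++ PySem.Int.toChars j ++ (")\n".toList)

-- ===== PORT A =====
-- A's inner loop body: the two sequential if-blocks, in source order; state (on, off, broken, count_column)
def pvStepA (i : Nat) (t : List Char × List Char × List Char × Nat) (c : Char) :
    List Char × List Char × List Char × Nat :=
  let on := t.1; let off := t.2.1; let br := t.2.2.1; let j := t.2.2.2
  let p1 : List Char × List Char :=
    if c = 'D' || c = 'd' then
      (off ++ pvFmt ("(light-off x".toList) (↑i) (↑j),
       if c = 'd' then br ++ pvFmt ("(broken x".toList) (↑i) (↑j) else br)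
    else (off, br)
  let p2 : List Char × List Char :=
    if c = 'L' || c = 'l' then
      (on ++ pvFmt ("(light-on x".toList) (↑i) (↑j),
       if c = 'l' then p1.2 ++ pvFmt ("(broken x".toList) (↑i) (↑j) else p1.2)
    else (on, p1.2)
  (p2.1, p1.1, p2.2, j + 1)

def generateLightOnOffBroken (i_parameters : List String) : String × String × String :=
  let r := i_parameters.foldl
    (fun (st : List Char × List Char × List Char × Nat) line =>
      -- line[:-1] is PySem.Str.slice line none (some (-1)); count_column restarts at 0
      let inner := (PySem.Str.slice line none (some (-1))).toList.foldl
        (pvStepA st.2.2.2) (st.1, st.2.1, st.2.2.1, 0)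
      (inner.1, inner.2.1, inner.2.2.1, st.2.2.2 + 1))
    (([] : List Char), ([] : List Char), ([] : List Char), (0 : Nat))
  (String.ofList r.1, String.ofList r.2.1, String.ofList r.2.2.1)

-- ===== PORT B =====
-- the flattened cell list [(i, j, ch) …] from the two enumerates
def pvCells (i_parameters : List String) : List (Int × Int × Char) :=
  (PySem.List.enumerate i_parameters).flatMap (fun li =>
    (PySem.List.enumerate (PySem.Str.slice li.2 none (some (-1))).toList).map
      (fun jc => (li.1, jc.1, jc.2)))

-- ''.join(f'(<tag> x{i} y{j})\n' for i, j, ch in cells if sel ch)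
def pvJoin (tag : List Char) (sel : Char → Bool) (cells : List (Int × Int × Char)) : List Char :=
  (cells.filter (fun t => sel t.2.2)).flatMap (fun t => pvFmt tag t.1 t.2.1)

def generateLightOnOffBroken_alt (i_parameters : List String) : String × String × String :=
  let cells := pvCells i_parameters
  (String.ofList (pvJoin ("(light-on x".toList) (fun c => c = 'L' || c = 'l') cells),
   String.ofList (pvJoin ("(light-off x".toList) (fun c => c = 'D' || c = 'd') cells),
   String.ofList (pvJoin ("(broken x".toList) (fun c => c = 'd' || c = 'l') cells))

-- ===== PRECONDITION & SPEC =====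
def Spec_generateLightOnOffBroken (i_parameters : List String) (out : String × String × String) : Prop := out = generateLightOnOffBroken_alt i_parameters
instance (i_parameters : List String) (out : String × String × String) : Decidable (Spec_generateLightOnOffBroken i_parameters out) := by unfold Spec_generateLightOnOffBroken; infer_instance

-- ===== CLAIM (what is proved, stated in full; the proofs are below) =====
def Claim_equal_generateLightOnOffBroken : Prop := ∀ (i_parameters : List String), Dom_generateLightOnOffBroken i_parameters → Spec_generateLightOnOffBroken i_parameters (generateLightOnOffBroken i_parameters)

-- ===== LEMMAS AND PROOFS =====

-- proof-side: the flattened cells of the remaining rows, rows numbered from i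
def pvCellsFrom (i : Int) (lines : List String) : List (Int × Int × Char) :=
  (PySem.List.enumerate lines i).flatMap (fun li =>
    (PySem.List.enumerate (PySem.Str.slice li.2 none (some (-1))).toList).map
      (fun jc => (li.1, jc.1, jc.2)))

-- a single row's cell list, row index i, columns starting at k
def pvRow (i : Int) (cs : List Char) (k : Int) : List (Int × Int × Char) :=
  (PySem.List.enumerate cs k).map (fun jc => (i, jc.1, jc.2))

-- what one pass of A's inner body appends to each accumulator
theorem pvStepA_eq (i : Nat) (c : Char) (on off br : List Char) (j : Nat) :
    pvStepA i (on, off, br, j) c =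
      (on ++ (if c = 'L' || c = 'l' then pvFmt ("(light-on x".toList) (↑i) (↑j) else []),
       off ++ (if c = 'D' || c = 'd' then pvFmt ("(light-off x".toList) (↑i) (↑j) else []),
       br ++ (if c = 'd' || c = 'l' then pvFmt ("(broken x".toList) (↑i) (↑j) else []),
       j + 1) := by
  by_cases h1 : c = 'D' <;> by_cases h2 : c = 'd' <;> by_cases h3 : c = 'L' <;> by_cases h4 : c = 'l' <;>
    simp_all [pvStepA]

theorem pvJoin_cons (tag : List Char) (sel : Char → Bool) (t : Int × Int × Char) (ts : List (Int × Int × Char)) :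
    pvJoin tag sel (t :: ts) = (if sel t.2.2 then pvFmt tag t.1 t.2.1 else []) ++ pvJoin tag sel ts := by
  by_cases h : sel t.2.2 <;> simp [pvJoin, h]

theorem pvJoin_append (tag : List Char) (sel : Char → Bool) (xs ys : List (Int × Int × Char)) :
    pvJoin tag sel (xs ++ ys) = pvJoin tag sel xs ++ pvJoin tag sel ys := by
  simp [pvJoin]

-- A's inner loop = B's three per-row joins
theorem pvInner (i : Nat) (cs : List Char) : ∀ (k : Nat) (on off br : List Char),
    cs.foldl (pvStepA i) (on, off, br, k) =
      (on ++ pvJoin ("(light-on x".toList) (fun c => c = 'L' || c = 'l') (pvRow (↑i) cs (↑k)),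
       off ++ pvJoin ("(light-off x".toList) (fun c => c = 'D' || c = 'd') (pvRow (↑i) cs (↑k)),
       br ++ pvJoin ("(broken x".toList) (fun c => c = 'd' || c = 'l') (pvRow (↑i) cs (↑k)),
       k + cs.length) := by
  induction cs with
  | nil => intro k on off br; simp [pvRow, pvJoin, PySem.List.enumerate_nil]
  | cons c cs ih =>
    intro k on off br
    have he : PySem.List.enumerate (c :: cs) (↑k : Int) = ((↑k : Int), c) :: PySem.List.enumerate cs (↑k + 1) :=
      PySem.List.enumerate_cons ..
    have hk : ((↑k : Int) + 1) = ((↑(k + 1) : Nat) : Int) := by push_cast; ring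
    rw [List.foldl_cons, pvStepA_eq, ih]
    simp only [pvRow, he, hk, List.map_cons, pvJoin_cons]
    refine Prod.ext ?_ (Prod.ext ?_ (Prod.ext ?_ ?_)) <;> simp [List.append_assoc] <;> omega

-- A's outer loop = B's three joins over the flattened cells of the remaining rows
theorem pvOuter (lines : List String) : ∀ (i : Nat) (on off br : List Char),
    lines.foldl
      (fun (st : List Char × List Char × List Char × Nat) line =>
        let inner := (PySem.Str.slice line none (some (-1))).toList.foldl
          (pvStepA st.2.2.2) (st.1, st.2.1, st.2.2.1, 0)
        (inner.1, inner.2.1, inner.2.2.1, st.2.2.2 + 1)) (on, off, br, i) =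
    (on ++ pvJoin ("(light-on x".toList) (fun c => c = 'L' || c = 'l') (pvCellsFrom (↑i) lines),
     off ++ pvJoin ("(light-off x".toList) (fun c => c = 'D' || c = 'd') (pvCellsFrom (↑i) lines),
     br ++ pvJoin ("(broken x".toList) (fun c => c = 'd' || c = 'l') (pvCellsFrom (↑i) lines),
     i + lines.length) := by
  induction lines with
  | nil => intro i on off br; simp [pvCellsFrom, pvJoin, PySem.List.enumerate_nil]
  | cons line rest ih =>
    intro i on off br
    have he : PySem.List.enumerate (line :: rest) (↑i : Int)
        = ((↑i : Int), line) :: PySem.List.enumerate rest (↑i + 1) :=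
      PySem.List.enumerate_cons ..
    have hk : ((↑i : Int) + 1) = ((↑(i + 1) : Nat) : Int) := by push_cast; ring
    have hcells : pvCellsFrom (↑i) (line :: rest)
        = pvRow (↑i) (PySem.Str.slice line none (some (-1))).toList 0 ++ pvCellsFrom ((↑i : Int) + 1) rest := by
      simp only [pvCellsFrom, pvRow, he, List.flatMap_cons]
    rw [hk] at hcells
    rw [List.foldl_cons]
    simp only [pvInner i _ 0, Nat.cast_zero, Nat.zero_add]
    rw [ih, hcells]
    simp only [pvJoin_append]
    refine Prod.ext ?_ (Prod.ext ?_ (Prod.ext ?_ ?_)) <;> simp [List.append_assoc] <;> omega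

-- ===== VERDICT (by name: the statement is the Claim_ definition above) =====
theorem generateLightOnOffBroken_spec : Claim_equal_generateLightOnOffBroken := by
  intro ps _
  unfold Spec_generateLightOnOffBroken generateLightOnOffBroken generateLightOnOffBroken_alt
  have h0 : pvCells ps = pvCellsFrom ((0 : Nat) : Int) ps := by simp [pvCells, pvCellsFrom]
  simp only [pvOuter ps 0 [] [] [], h0, List.nil_append]
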